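-- pv_equiv track=rewrite | github.com/PatrickLZH/24point_streamlit | 24point_streamlit.py | all_operations_combine
-- ===== SOURCE A (Python) =====
-- import itertools
--
-- def all_operations_combine(cards):
--     c1, c2, c3, c4 = cards
--     operations = ['+', '-', '*', '/']
--     expressions = []
--     for ops in itertools.product(operations, repeat=3):  # 笛卡尔积
--         op1, op2, op3 = ops
--         expressions.append(f'{c1}{op1}({c2}{op2}({c3}{op3}{c4}))')
--         expressions.append(f'{c1}{op1}(({c2}{op2}{c3}){op3}{c4})')
--         expressions.append(f'({c1}{op1}{c2}){op2}({c3}{op3}{c4})')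
--         expressions.append(f'({c1}{op1}({c2}{op2}{c3})){op3}{c4}')
--         expressions.append(f'(({c1}{op1}{c2}){op2}{c3}){op3}{c4}')
--     return expressions
-- ===== SOURCE B (Python) =====
-- import itertools
--
-- def all_operations_combine(cards):
--     # B: recursive split-point generator replacing the 5 hard-coded templates;
--     # same operator-triple order, compound operands wrapped in parentheses.
--     def gen(nums, ops):
--         if len(nums) == 1:
--             yield nums[0], True
--             return
--         for k in range(1, len(nums)):
--             for l, lleaf in gen(nums[:k], ops[:k - 1]):
--                 ls = l if lleaf else f'({l})'
--                 for r, rleaf in gen(nums[k:], ops[k:]):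
--                     rs = r if rleaf else f'({r})'
--                     yield f'{ls}{ops[k - 1]}{rs}', False
--     c1, c2, c3, c4 = cards
--     expressions = []
--     for ops in itertools.product(['+', '-', '*', '/'], repeat=3):
--         for e, _ in gen([c1, c2, c3, c4], ops):
--             expressions.append(e)
--     return expressions
-- ===== Notes on version B (the rewrite author's own statement) =====
-- stated objective: alternative
-- what changed: The 5 hard-coded parenthesization templates are replaced by a recursive split-point generator that renders every binary bracketing of the four cards, wrapping compound operands in parentheses; the outer loop over the 64 operator triples is kept.
import Mathlib
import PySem

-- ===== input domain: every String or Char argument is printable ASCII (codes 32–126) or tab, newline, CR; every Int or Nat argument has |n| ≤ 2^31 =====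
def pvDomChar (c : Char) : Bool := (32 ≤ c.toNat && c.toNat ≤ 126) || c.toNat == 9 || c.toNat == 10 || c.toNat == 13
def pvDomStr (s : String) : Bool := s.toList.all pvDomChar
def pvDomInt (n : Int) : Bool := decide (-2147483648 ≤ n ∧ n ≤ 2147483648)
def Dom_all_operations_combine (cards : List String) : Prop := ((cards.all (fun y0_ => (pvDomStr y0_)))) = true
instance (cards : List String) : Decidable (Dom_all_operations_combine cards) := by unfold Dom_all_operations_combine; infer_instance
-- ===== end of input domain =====

-- B replaces the 5 hard-coded templates by a recursive split-point generator (alternative decomposition; same output).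

-- ===== PORT A =====
def pvOpsA : List String := ["+", "-", "*", "/"]
-- itertools.product(operations, repeat=3), in order
def pvTriplesA : List (String × String × String) :=
  pvOpsA.flatMap (fun a => pvOpsA.flatMap (fun b => pvOpsA.map (fun c => (a, b, c))))

def all_operations_combine (cards : List String) : List String :=
  match cards with
  | [c1, c2, c3, c4] =>
    pvTriplesA.foldl (fun exprs ops =>
      let op1 := ops.1; let op2 := ops.2.1; let op3 := ops.2.2
      exprs ++
        [c1 ++ op1 ++ "(" ++ c2 ++ op2 ++ "(" ++ c3 ++ op3 ++ c4 ++ "))",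
         c1 ++ op1 ++ "((" ++ c2 ++ op2 ++ c3 ++ ")" ++ op3 ++ c4 ++ ")",
         "(" ++ c1 ++ op1 ++ c2 ++ ")" ++ op2 ++ "(" ++ c3 ++ op3 ++ c4 ++ ")",
         "(" ++ c1 ++ op1 ++ "(" ++ c2 ++ op2 ++ c3 ++ "))" ++ op3 ++ c4,
         "((" ++ c1 ++ op1 ++ c2 ++ ")" ++ op2 ++ c3 ++ ")" ++ op3 ++ c4]) []
  | _ => []  -- Python raises ValueError on unpacking here; excluded by Pre_

-- ===== PORT B =====
def pvOpsB : List String := ["+", "-", "*", "/"]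
def pvTriplesB : List (String × String × String) :=
  pvOpsB.flatMap (fun a => pvOpsB.flatMap (fun b => pvOpsB.map (fun c => (a, b, c))))

-- Source B's gen, with a fuel parameter (= nums.length at the top call) only to make the recursion total
def pvGen : Nat → List String → List String → List (String × Bool)
  | 0, _, _ => []
  | fuel + 1, nums, ops =>
    if nums.length == 1 then [(nums.headD "", true)]
    else
      (List.range' 1 (nums.length - 1)).flatMap (fun k =>
        (pvGen fuel (nums.take k) (ops.take (k - 1))).flatMap (fun lp =>
          let ls := if lp.2 then lp.1 else "(" ++ lp.1 ++ ")"
          (pvGen fuel (nums.drop k) (ops.drop k)).map (fun rp =>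
            let rs := if rp.2 then rp.1 else "(" ++ rp.1 ++ ")"
            (ls ++ ops.getD (k - 1) "" ++ rs, false))))

-- Source B's 'c1, c2, c3, c4 = cards' (none = ValueError, excluded by Pre_)
def pvUnpack4 (l : List String) : Option (String × String × String × String) :=
  match l with
  | c1 :: l1 =>
    match l1 with
    | c2 :: l2 =>
      match l2 with
      | c3 :: l3 =>
        match l3 with
        | c4 :: l4 =>
          match l4 with
          | [] => some (c1, c2, c3, c4)
          | _ :: _ => none
        | [] => none
      | [] => none
    | [] => none
  | [] => none

def all_operations_combine_alt (cards : List String) : List String :=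
  match pvUnpack4 cards with
  | some (c1, c2, c3, c4) =>
    pvTriplesB.foldl (fun exprs ops =>
      exprs ++ (pvGen 4 [c1, c2, c3, c4] [ops.1, ops.2.1, ops.2.2]).map Prod.fst) []
  | none => []

-- ===== PRECONDITION & SPEC =====
-- Pre_: Python A unpacks 'c1, c2, c3, c4 = cards' and raises ValueError unless cards has exactly 4 elements.
def Pre_all_operations_combine (cards : List String) : Prop := cards.length = 4
instance (cards : List String) : Decidable (Pre_all_operations_combine cards) := by unfold Pre_all_operations_combine; infer_instance
def pvWitness_all_operations_combine : List String := ["1", "2", "3", "4"]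

def Spec_all_operations_combine (cards : List String) (out : List String) : Prop := out = all_operations_combine_alt cards
instance (cards : List String) (out : List String) : Decidable (Spec_all_operations_combine cards out) := by unfold Spec_all_operations_combine; infer_instance

-- ===== CLAIM (what is proved, stated in full; the proofs are below) =====
def Claim_equal_all_operations_combine : Prop := ∀ (cards : List String), Dom_all_operations_combine cards → Pre_all_operations_combine cards → Spec_all_operations_combine cards (all_operations_combine cards)

-- ===== LEMMAS AND PROOFS =====

theorem pvPP : (")" : String) ++ ")" = "))" := rfl
theorem pvParL (s : String) : ("(" : String) ++ ("(" ++ s) = "((" ++ s := by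
  rw [← String.append_assoc]; rfl
theorem pvParR (s : String) : (")" : String) ++ (")" ++ s) = "))" ++ s := by
  rw [← String.append_assoc]; rfl

-- B's generator on a 4-element list yields exactly A's five templates, in order.
set_option maxHeartbeats 2000000 in
theorem pvGen_block (c1 c2 c3 c4 o1 o2 o3 : String) :
    (pvGen 4 [c1, c2, c3, c4] [o1, o2, o3]).map Prod.fst =
      [c1 ++ o1 ++ "(" ++ c2 ++ o2 ++ "(" ++ c3 ++ o3 ++ c4 ++ "))",
       c1 ++ o1 ++ "((" ++ c2 ++ o2 ++ c3 ++ ")" ++ o3 ++ c4 ++ ")",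
       "(" ++ c1 ++ o1 ++ c2 ++ ")" ++ o2 ++ "(" ++ c3 ++ o3 ++ c4 ++ ")",
       "(" ++ c1 ++ o1 ++ "(" ++ c2 ++ o2 ++ c3 ++ "))" ++ o3 ++ c4,
       "((" ++ c1 ++ o1 ++ c2 ++ ")" ++ o2 ++ c3 ++ ")" ++ o3 ++ c4] := by
  simp only [pvGen]
  norm_num [List.range', String.append_assoc, pvPP, pvParL, pvParR]

-- ===== VERDICT (by name: the statement is the Claim_ definition above) =====
theorem all_operations_combine_spec : Claim_equal_all_operations_combine := by
  intro cards _ hpre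
  unfold Spec_all_operations_combine all_operations_combine all_operations_combine_alt
  rcases cards with _ | ⟨c1, _ | ⟨c2, _ | ⟨c3, _ | ⟨c4, _ | ⟨c5, t⟩⟩⟩⟩⟩ <;>
    simp [Pre_all_operations_combine] at hpre
  simp only [pvUnpack4]
  have hT : pvTriplesB = pvTriplesA := rfl
  rw [hT]
  apply List.foldl_ext
  intro acc ops _
  rw [pvGen_block]
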